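-- pv_equiv track=rewrite | github.com/SylvainDe/aoc | python/2017/day16.py | perform_many_dances
-- ===== SOURCE A (Python) =====
-- import string
--
-- def perform_dance(dance, progs):
--     nb_prog = len(progs)
--     sep = "/"
--     for d in dance:
--         c, arg = d[0], d[1:]
--         if c == "s":
--             n = int(arg)
--             progs = progs[-n:] + progs[:-n]
--             assert len(set(progs)) == len(progs) == nb_prog
--         elif c == "x":
--             arg1, mid, arg2 = arg.partition(sep)
--             assert mid == sep
--             i1, i2 = int(arg1), int(arg2)
--             progs[i1], progs[i2] = progs[i2], progs[i1]
--         elif c == "p":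
--             arg1, mid, arg2 = arg.partition(sep)
--             assert mid == sep
--             i1, i2 = progs.index(arg1), progs.index(arg2)
--             progs[i1], progs[i2] = progs[i2], progs[i1]
--         else:
--             assert False
--     assert len(set(progs)) == len(progs) == nb_prog
--     return "".join(progs)
--
-- def perform_many_dances(dance, nb_prog, nb_iter=1000000000):
--     progs = string.ascii_lowercase[:nb_prog]
--     seen = {progs: 0}
--     for i in range(1, nb_iter):
--         progs = perform_dance(dance, list(progs))
--         if progs in seen:
--             break
--         seen[progs] = i
--     else:
--         return progs
--     freq = i - seen[progs]
--     rem = (nb_iter - i) % freq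
--     for i in range(rem):
--         progs = perform_dance(dance, list(progs))
--     return progs
-- ===== SOURCE B (Python) =====
-- import string
--
--
-- def _parse_move(d):
--     """Parse one move into a tagged tuple; raise on anything malformed."""
--     if d.startswith("s"):
--         return ("s", int(d[1:]), 0)
--     if d.startswith("x"):
--         a, sep, b = d[1:].partition("/")
--         if sep != "/":
--             raise ValueError(d)
--         return ("x", int(a), int(b))
--     if d.startswith("p"):
--         a, sep, b = d[1:].partition("/")
--         if sep != "/":
--             raise ValueError(d)
--         if len(a) != 1 or len(b) != 1:
--             raise ValueError(d)
--         return ("p", a, b)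
--     raise ValueError(d)
--
--
-- def _swap_at(lst, i, j):
--     """New list with the items at (possibly negative) indices i and j swapped."""
--     m = len(lst)
--     if not (-m <= i < m and -m <= j < m):
--         raise IndexError(i)
--     i %= m
--     j %= m
--     return [lst[j] if t == i else (lst[i] if t == j else v) for t, v in enumerate(lst)]
--
--
-- def perform_many_dances(dance, nb_prog, nb_iter=1000000000):
--     base = string.ascii_lowercase[:nb_prog]
--     if nb_iter <= 1:
--         return base
--     m = len(base)
--     # Compile the dance ONCE into a position permutation (which old position each
--     # new position draws from; spin/exchange moves) and a letter relabeling
--     # (partner moves), instead of re-interpreting the move strings every round.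
--     perm = list(range(m))
--     lt = list(base)
--     for mv in map(_parse_move, dance):
--         if mv[0] == "s":
--             n = mv[1]
--             perm = perm[-n:] + perm[:-n]
--         elif mv[0] == "x":
--             perm = _swap_at(perm, mv[1], mv[2])
--         else:
--             a, b = mv[1], mv[2]
--             lt = [b if c == a else (a if c == b else c) for c in lt]
--
--     def step(s):
--         return "".join(lt[ord(s[j]) - 97] for j in perm)
--
--     # One composed O(m) table step per round; the step is a bijection, so the
--     # first repeated state is the initial string.
--     s = step(base)
--     p = 1
--     while s != base and p < nb_iter - 1:
--         s = step(s)
--         p += 1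
--     if s != base:
--         return s
--     r = (nb_iter - p) % p
--     for _ in range(r):
--         s = step(s)
--     return s
-- ===== Notes on version B (the rewrite author's own statement) =====
-- stated objective: faster
-- what changed: B parses the dance once into a tagged-move list and folds it into a position permutation (spin/exchange, exchange done by one enumerate pass) plus a letter relabeling (partner swaps as a relabeling map), then iterates the composed O(m) table step with cycle detection against the initial string (the step is a bijection, so the first repeated state is the start), instead of A's re-interpreting every move string on every iteration while keeping a dict of all seen states.
import Mathlib
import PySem

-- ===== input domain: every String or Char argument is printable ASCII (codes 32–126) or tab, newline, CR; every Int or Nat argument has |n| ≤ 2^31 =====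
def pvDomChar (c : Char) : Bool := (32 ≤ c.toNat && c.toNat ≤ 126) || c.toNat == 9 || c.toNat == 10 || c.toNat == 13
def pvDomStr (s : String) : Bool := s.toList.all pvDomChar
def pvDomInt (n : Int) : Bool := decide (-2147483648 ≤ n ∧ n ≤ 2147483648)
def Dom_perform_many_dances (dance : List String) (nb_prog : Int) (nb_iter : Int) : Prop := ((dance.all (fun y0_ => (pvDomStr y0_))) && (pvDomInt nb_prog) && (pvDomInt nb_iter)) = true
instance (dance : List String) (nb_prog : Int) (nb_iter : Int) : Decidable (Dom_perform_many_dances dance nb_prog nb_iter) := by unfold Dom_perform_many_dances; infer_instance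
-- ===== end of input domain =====

-- B compiles the dance once into a parsed move list (an IR), folds it into a position
-- permutation plus a letter relabeling, and iterates the composed O(m) table step with
-- cycle detection against the initial string, instead of A's per-iteration
-- re-interpretation of every move string with a dict of all seen states (objective: faster).


-- shared constants / tiny Python-exact helpers (used by both ports and by Pre_)
-- string.ascii_lowercase
def pvLow : List Char :=
  ['a','b','c','d','e','f','g','h','i','j','k','l','m','n','o','p','q','r','s','t','u','v','w','x','y','z']

-- arg.partition("/") for a single-char separator: (before, sep-found?, after); exact: splits at the FIRST '/'
def pvPart : List Char → List Char × Bool × List Char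
  | [] => ([], false, [])
  | c :: r =>
    if c = '/' then ([], true, r)
    else
      let p := pvPart r
      (c :: p.1, p.2.1, p.2.2)

-- ===== PORT A =====
-- one move d of perform_dance; state progs as List Char (list of 1-char strings); none = Python raises
def pvMoveA (nbp : Int) (progs : List Char) (d : String) : Option (List Char) :=
  match PySem.Str.pyGet? d 0 with
  | none => none
  | some c =>
    let arg := (PySem.Str.slice d (some 1) none).toList
    if c = 's' then
      match PySem.Int.ofChars? arg with
      | none => none
      | some n =>
        let progs' := PySem.List.slice progs (some (-n)) none ++ PySem.List.slice progs none (some (-n))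
        if PySem.Set.len (PySem.Set.ofList progs') = PySem.List.len progs' ∧ PySem.List.len progs' = nbp
        then some progs' else none
    else if c = 'x' then
      match pvPart arg with
      | (a1, true, a2) =>
        match PySem.Int.ofChars? a1, PySem.Int.ofChars? a2 with
        | some i1, some i2 =>
          match PySem.List.pyGet? progs i2, PySem.List.pyGet? progs i1 with
          | some t1, some t2 =>
            match PySem.List.pySet? progs i1 t1 with
            | some p1 => PySem.List.pySet? p1 i2 t2
            | none => none
          | _, _ => none
        | _, _ => none
      | (_, false, _) => none
    else if c = 'p' then
      match pvPart arg with
      | (a1, true, a2) =>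
        -- progs.index(arg1): a (possibly multi-char) string matches a 1-char element iff it IS that char
        match (match a1 with | [ch] => PySem.List.index? progs ch | _ => none),
              (match a2 with | [ch] => PySem.List.index? progs ch | _ => none) with
        | some i1, some i2 =>
          match PySem.List.pyGet? progs (i2 : Int), PySem.List.pyGet? progs (i1 : Int) with
          | some t1, some t2 =>
            match PySem.List.pySet? progs (i1 : Int) t1 with
            | some p1 => PySem.List.pySet? p1 (i2 : Int) t2
            | none => none
          | _, _ => none
        | _, _ => none
      | (_, false, _) => none
    else none

-- perform_dance(dance, progs)
def pvDanceA (dance : List String) (progs : List Char) : Option (List Char) :=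
  match dance.foldl (fun acc d => acc.bind (fun p => pvMoveA (PySem.List.len progs) p d)) (some progs) with
  | none => none
  | some r =>
    if PySem.Set.len (PySem.Set.ofList r) = PySem.List.len r ∧ PySem.List.len r = PySem.List.len progs
    then some r else none

-- the trailing 'for i in range(rem)' loop
def pvRestA (dance : List String) : Nat → List Char → Option (List Char)
  | 0, p => some p
  | Nat.succ k, p => (pvDanceA dance p).bind (pvRestA dance k)

-- the 'for i in range(1, nb_iter): … else: …' loop (fuel = number of remaining iterations)
def pvLoopA (dance : List String) (nb_iter : Int) :
    Nat → Int → List Char → PySem.Dict (List Char) Int → Option (List Char)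
  | 0, _, progs, _ => some progs
  | Nat.succ fuel, i, progs, seen =>
    match pvDanceA dance progs with
    | none => none
    | some p' =>
      if PySem.Dict.contains seen p' then
        match PySem.Dict.get? seen p' with
        | none => none
        | some j =>
          match PySem.Int.mod? (nb_iter - i) (i - j) with
          | none => none
          | some rem => pvRestA dance rem.toNat p'
      else pvLoopA dance nb_iter fuel (i + 1) p' (PySem.Dict.insert seen p' i)

def perform_many_dances (dance : List String) (nb_prog : Int) (nb_iter : Int) : String :=
  let progs := PySem.List.slice pvLow none (some nb_prog)
  let seen := PySem.Dict.insert (PySem.Dict.empty) progs (0 : Int)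
  match pvLoopA dance nb_iter (nb_iter - 1).toNat 1 progs seen with
  | some r => String.ofList r    -- "".join(progs)
  | none => ""               -- Python raises here; excluded by Pre_

-- ===== PORT B =====
-- the parsed-move IR of Source B's _parse_move (tagged tuples)
inductive PvMv : Type
  | s : Int → PvMv
  | x : Int → Int → PvMv
  | p : Char → Char → PvMv
deriving DecidableEq, Repr

-- _parse_move(d); none = Source B raises (d[1:] is exactly toList.drop-via-slice)
def pvParseMove (d : String) : Option PvMv :=
  if PySem.Str.startswith d "s" then
    (PySem.Int.ofChars? ((PySem.Str.slice d (some 1) none).toList)).map PvMv.s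
  else if PySem.Str.startswith d "x" then
    match pvPart ((PySem.Str.slice d (some 1) none).toList) with
    | (a, true, b) =>
      match PySem.Int.ofChars? a, PySem.Int.ofChars? b with
      | some i, some j => some (PvMv.x i j)
      | _, _ => none
    | (_, false, _) => none
  else if PySem.Str.startswith d "p" then
    match pvPart ((PySem.Str.slice d (some 1) none).toList) with
    | (a, true, b) =>
      match a, b with
      | [c1], [c2] => some (PvMv.p c1 c2)
      | _, _ => none
    | (_, false, _) => none
  else none

-- _swap_at(lst, i, j): range-check, normalize with %, rebuild by one enumerate pass
def pvSwapAt (lst : List Int) (i j : Int) : Option (List Int) :=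
  if -(lst.length : Int) ≤ i ∧ i < lst.length ∧ -(lst.length : Int) ≤ j ∧ j < lst.length then
    some ((PySem.List.enumerate lst).map (fun tv =>
      if tv.1 = PySem.Int.mod i lst.length then PySem.List.pyGetD lst (PySem.Int.mod j lst.length) 0
      else if tv.1 = PySem.Int.mod j lst.length then PySem.List.pyGetD lst (PySem.Int.mod i lst.length) 0
      else tv.2))
  else none

-- the body of Source B's compile loop: apply one parsed move to the (perm, lt) tables
def pvApplyMove (st : List Int × List Char) : PvMv → Option (List Int × List Char)
  | PvMv.s n =>
      some (PySem.List.slice st.1 (some (-n)) none ++ PySem.List.slice st.1 none (some (-n)), st.2)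
  | PvMv.x i j => (pvSwapAt st.1 i j).map (fun q => (q, st.2))
  | PvMv.p a b => some (st.1, st.2.map (fun c => if c = a then b else if c = b then a else c))

-- step(s): "".join(lt[ord(s[j]) - 97] for j in perm)  (indices in range under Pre_)
def pvStepB (perm : List Int) (lt : List Char) (s : List Char) : List Char :=
  perm.map (fun j => PySem.List.pyGetD lt (((PySem.List.pyGetD s j ' ').toNat : Int) - 97) ' ')

-- the trailing 'for _ in range(r)' loop
def pvIterB (perm : List Int) (lt : List Char) : Nat → List Char → List Char
  | 0, s => s
  | Nat.succ k, s => pvIterB perm lt k (pvStepB perm lt s)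

-- the 'while s != base and p < nb_iter - 1' loop (fuel = nb_iter - 1 - p at every call)
def pvWhileB (perm : List Int) (lt : List Char) (base : List Char) (nbIter : Int) :
    Nat → Int → List Char → Int × List Char
  | 0, p, s => (p, s)
  | Nat.succ f, p, s =>
    if s ≠ base ∧ p < nbIter - 1 then pvWhileB perm lt base nbIter f (p + 1) (pvStepB perm lt s)
    else (p, s)

def perform_many_dances_alt (dance : List String) (nb_prog : Int) (nb_iter : Int) : String :=
  let base := PySem.List.slice pvLow none (some nb_prog)
  if nb_iter ≤ 1 then String.ofList base
  else
    match dance.foldl (fun acc d => acc.bind (fun st => (pvParseMove d).bind (pvApplyMove st)))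
        (some (PySem.List.pyRange 0 (base.length : Int) 1, base)) with
    | none => ""               -- Source B raises here; excluded by Pre_
    | some st =>
      let pr := pvWhileB st.1 st.2 base nb_iter (nb_iter - 2).toNat 1 (pvStepB st.1 st.2 base)
      if pr.2 ≠ base then String.ofList pr.2
      else String.ofList (pvIterB st.1 st.2 (PySem.Int.mod (nb_iter - pr.1) pr.1).toNat pr.2)

-- ===== PRECONDITION & SPEC =====
-- a dance move that executes without an exception on a state that is a permutation of the
-- first m lowercase letters (that set of states is invariant, so this is state-independent)
def pvValidMove (m : Nat) (d : String) : Bool :=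
  match d.toList with
  | [] => false
  | c :: arg =>
    if c = 's' then (PySem.Int.ofChars? arg).isSome
    else if c = 'x' then
      match pvPart arg with
      | (a1, true, a2) =>
        match PySem.Int.ofChars? a1, PySem.Int.ofChars? a2 with
        | some i1, some i2 => decide (-(m : Int) ≤ i1 ∧ i1 < m ∧ -(m : Int) ≤ i2 ∧ i2 < m)
        | _, _ => false
      | (_, false, _) => false
    else if c = 'p' then
      match pvPart arg with
      | ([c1], true, [c2]) => decide (97 ≤ c1.toNat ∧ c1.toNat < 97 + m ∧ 97 ≤ c2.toNat ∧ c2.toNat < 97 + m)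
      | _ => false
    else false

-- exactly the inputs where Python A returns: either the dance loop never runs (nb_iter ≤ 1),
-- or every move is well-formed and in range for the nb_prog-letter state
def Pre_perform_many_dances (dance : List String) (nb_prog : Int) (nb_iter : Int) : Prop :=
  nb_iter ≤ 1 ∨ dance.all (pvValidMove (PySem.List.slice pvLow none (some nb_prog)).length) = true

instance (dance : List String) (nb_prog : Int) (nb_iter : Int) : Decidable (Pre_perform_many_dances dance nb_prog nb_iter) := by
  unfold Pre_perform_many_dances; infer_instance

def pvWitness_perform_many_dances : List String × Int × Int := (["s1", "x0/1", "pa/b"], 3, 10)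

def Spec_perform_many_dances (dance : List String) (nb_prog : Int) (nb_iter : Int) (out : String) : Prop := out = perform_many_dances_alt dance nb_prog nb_iter
instance (dance : List String) (nb_prog : Int) (nb_iter : Int) (out : String) : Decidable (Spec_perform_many_dances dance nb_prog nb_iter out) := by unfold Spec_perform_many_dances; infer_instance

-- ===== CLAIM (what is proved, stated in full; the proofs are below) =====
def Claim_equal_perform_many_dances : Prop := ∀ (dance : List String) (nb_prog : Int) (nb_iter : Int), Dom_perform_many_dances dance nb_prog nb_iter → Pre_perform_many_dances dance nb_prog nb_iter → Spec_perform_many_dances dance nb_prog nb_iter (perform_many_dances dance nb_prog nb_iter)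

-- ===== LEMMAS AND PROOFS =====

-- ---- generic bridges between Python primitives and List operations ----

theorem pv_char_eq_of_toNat {c d : Char} (h : c.toNat = d.toNat) : c = d := by
  cases c; cases d; simp_all [Char.toNat]; exact UInt32.toNat_inj.mp h

theorem pv_pyGet?_map {α β : Type} (l : List α) (f : α → β) (i : Int) :
    PySem.List.pyGet? (l.map f) i = (PySem.List.pyGet? l i).map f := by
  simp [PySem.List.pyGet?, PySem.List.pyIdx?]

theorem pv_pySet?_map {α β : Type} (l : List α) (f : α → β) (i : Int) (x : α) :
    PySem.List.pySet? (l.map f) i (f x) = (PySem.List.pySet? l i x).map (List.map f) := by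
  simp only [PySem.List.pySet?, PySem.List.pyIdx?, List.length_map]
  split_ifs <;> simp [List.map_set]

theorem pv_slice_map {α β : Type} (l : List α) (f : α → β) (a b : Option Int) :
    PySem.List.slice (l.map f) a b = (PySem.List.slice l a b).map f := by
  simp only [PySem.List.slice, List.length_map]
  cases a <;> cases b <;> simp [List.map_take, List.map_drop]

theorem pv_slice_none_some {α : Type} (l : List α) (b : Int) :
    PySem.List.slice l none (some b) = l.take (PySem.List.clampIdx l.length b) := by
  simp [PySem.List.slice]

theorem pv_spin_perm {α : Type} (l : List α) (n : Int) :
    List.Perm (PySem.List.slice l (some n) none ++ PySem.List.slice l none (some n)) l := by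
  rw [PySem.List.slice_some_none, pv_slice_none_some]
  exact (List.perm_append_comm).trans (by rw [List.take_append_drop])

-- the normalized Nat index a Python index i ∈ [-n, n) refers to
def pvNorm (n : Nat) (i : Int) : Nat := if 0 ≤ i then i.toNat else n - (-i).toNat

theorem pv_norm_lt (n : Nat) (i : Int) (h1 : -(n : Int) ≤ i) (h2 : i < n) : pvNorm n i < n := by
  unfold pvNorm; split_ifs <;> omega

theorem pv_norm_eq_mod (n : Nat) (i : Int) (h1 : -(n : Int) ≤ i) (h2 : i < n) (h0 : 0 < n) :
    PySem.Int.mod i (n : Int) = ((pvNorm n i : Nat) : Int) := by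
  rw [PySem.Int.mod_eq_emod_of_pos (by omega)]
  unfold pvNorm
  split_ifs with hi
  · rw [Int.emod_eq_of_lt hi h2]; omega
  · have e : (i + (n : Int)) % (n : Int) = i % (n : Int) := by
      simpa using Int.add_mul_emod_self_left (a := i) (b := (n : Int)) (c := 1)
    rw [← e, Int.emod_eq_of_lt (by omega) (by omega)]
    omega

theorem pv_idx_get (n : Nat) (i : Int) (h1 : -(n : Int) ≤ i) (h2 : i < n)
    {β : Type} (l : List β) (d : β) (hl : l.length = n) :
    PySem.List.pyGet? l i = some (PySem.List.pyGetD l ((pvNorm n i : Nat) : Int) d) := by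
  unfold pvNorm
  by_cases h0 : 0 ≤ i
  · rw [if_pos h0]
    rw [PySem.List.pyGetD_eq_getElem l d (by omega) (by push_cast; omega)]
    simp only [PySem.List.pyGet?, PySem.List.pyIdx?, hl]
    simp [h0, h2, List.getElem?_eq_getElem (by omega : i.toNat < l.length)]
  · rw [if_neg h0]
    rw [PySem.List.pyGetD_eq_getElem l d (by omega) (by push_cast; omega)]
    simp only [PySem.List.pyGet?, PySem.List.pyIdx?, hl]
    have hx : (((n - (-i).toNat : Nat) : Int)).toNat = n - (-i).toNat := by omega
    simp [h0, h1, List.getElem?_eq_getElem (by omega : n - (-i).toNat < l.length), hx]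

theorem pv_idx_set (n : Nat) (i : Int) (h1 : -(n : Int) ≤ i) (h2 : i < n)
    {β : Type} (l : List β) (v : β) (hl : l.length = n) :
    PySem.List.pySet? l i v = some (l.set (pvNorm n i) v) := by
  unfold pvNorm
  by_cases h0 : 0 ≤ i
  · rw [if_pos h0]
    simp [PySem.List.pySet?, PySem.List.pyIdx?, hl, h0, h2]
  · rw [if_neg h0]
    simp [PySem.List.pySet?, PySem.List.pyIdx?, hl, h0, h1]

theorem pv_index?_of_mem {α : Type} [DecidableEq α] (l : List α) (c : α)
    (h : c ∈ l) : PySem.List.index? l c = some (List.idxOf c l) := by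
  rw [PySem.List.index?_eq_idxOf?]
  rw [List.idxOf_eq_getD_idxOf?]
  cases hx : List.idxOf? c l with
  | none => exact absurd h (List.idxOf?_eq_none_iff.mp hx)
  | some k => rfl

def pvRho (c1 c2 : Char) (c : Char) : Char := if c = c1 then c2 else if c = c2 then c1 else c

theorem pv_swap_eq_map_rho (l : List Char) (c1 c2 : Char) (hnd : l.Nodup)
    (h1 : c1 ∈ l) (h2 : c2 ∈ l) :
    (l.set (List.idxOf c1 l) c2).set (List.idxOf c2 l) c1 = l.map (pvRho c1 c2) := by
  have hi1 : List.idxOf c1 l < l.length := List.idxOf_lt_length_of_mem h1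
  have hi2 : List.idxOf c2 l < l.length := List.idxOf_lt_length_of_mem h2
  apply List.ext_getElem (by simp)
  intro k hk hk'
  have hkl : k < l.length := by simpa using hk'
  simp only [List.getElem_set, List.getElem_map]
  by_cases e2 : List.idxOf c2 l = k
  · subst e2
    simp [List.getElem_idxOf, pvRho]
    by_cases e : c2 = c1 <;> simp [e]
  · by_cases e1 : List.idxOf c1 l = k
    · subst e1
      simp [e2, List.getElem_idxOf, pvRho]
    · have hk1 : l[k] ≠ c1 := by
        intro he; exact e1 (by rw [← he]; exact (List.Nodup.idxOf_getElem hnd k hkl).symm ▸ rfl)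
      have hk2 : l[k] ≠ c2 := by
        intro he; exact e2 (by rw [← he]; exact (List.Nodup.idxOf_getElem hnd k hkl).symm ▸ rfl)
      simp [e1, e2, pvRho, hk1, hk2]

-- B's single enumerate pass equals the two point updates A performs
theorem pv_enumSwap (l : List Int) (k1 k2 : Nat) (h1 : k1 < l.length) (h2 : k2 < l.length) :
    (PySem.List.enumerate l).map (fun tv =>
        if tv.1 = ((k1 : Nat) : Int) then PySem.List.pyGetD l ((k2 : Nat) : Int) 0
        else if tv.1 = ((k2 : Nat) : Int) then PySem.List.pyGetD l ((k1 : Nat) : Int) 0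
        else tv.2)
      = (l.set k1 (PySem.List.pyGetD l ((k2 : Nat) : Int) 0)).set k2
          (PySem.List.pyGetD l ((k1 : Nat) : Int) 0) := by
  apply List.ext_getElem (by simp [PySem.List.length_enumerate])
  intro t ht ht'
  have htl : t < l.length := by simpa using ht'
  rw [List.getElem_map, PySem.List.getElem_enumerate]
  simp only [zero_add, List.getElem_set, Int.natCast_inj]
  by_cases e1 : t = k1
  · subst e1
    by_cases e2 : t = k2
    · subst e2; simp
    · have h2t : ¬ (k2 = t) := fun h => e2 h.symm
      simp [e2, h2t]
  · by_cases e2 : t = k2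
    · subst e2
      have h1t : ¬ (k1 = t) := fun h => e1 h.symm
      simp [e1, h1t]
    · have h1t : ¬ (k1 = t) := fun h => e1 h.symm
      have h2t : ¬ (k2 = t) := fun h => e2 h.symm
      simp [e1, e2, h1t, h2t]

-- ---- facts about the initial letter list ----

def pvBaseOK (base : List Char) : Prop :=
  base.Nodup ∧ ∀ k : Nat, k < base.length → (base.getD k ' ').toNat = 97 + k

theorem pv_base_ok (nb_prog : Int) : pvBaseOK (PySem.List.slice pvLow none (some nb_prog)) := by
  have h : PySem.List.slice pvLow none (some nb_prog)
      = pvLow.take (PySem.List.clampIdx pvLow.length nb_prog) := by simp [PySem.List.slice]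
  rw [h]
  constructor
  · exact (List.take_sublist _ _).nodup (by decide)
  · intro k hk
    have h26 : ∀ k : Nat, k < 26 → (pvLow.getD k ' ').toNat = 97 + k := by decide
    have hk' : k < pvLow.length := lt_of_lt_of_le (by simpa using hk) (by simp)
    rw [List.getD_eq_getElem?_getD, List.getElem?_take_of_lt (by simpa using hk),
        ← List.getD_eq_getElem?_getD]
    exact h26 k (by simpa using hk')

theorem pv_mem_base_iff (base : List Char) (hB : pvBaseOK base) (c : Char) :
    c ∈ base ↔ 97 ≤ c.toNat ∧ c.toNat < 97 + base.length := by
  constructor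
  · intro h
    obtain ⟨k, hk, he⟩ := List.mem_iff_getElem.mp h
    have := hB.2 k hk
    rw [List.getD_eq_getElem?_getD, List.getElem?_eq_getElem hk] at this
    simp only [Option.getD_some] at this
    rw [← he]; omega
  · rintro ⟨h1, h2⟩
    have hk : c.toNat - 97 < base.length := by omega
    have := hB.2 _ hk
    rw [List.getD_eq_getElem?_getD, List.getElem?_eq_getElem hk] at this
    simp at this
    have : base[c.toNat - 97] = c := pv_char_eq_of_toNat (by omega)
    exact this ▸ List.getElem_mem hk

-- ---- the letter-table application and the composed step ----

def pvLtApp (lt : List Char) (c : Char) : Char :=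
  PySem.List.pyGetD lt ((c.toNat : Int) - 97) ' '

def pvR (base : List Char) : List Int := PySem.List.pyRange 0 (base.length : Int) 1

theorem pv_stepB_eq (perm : List Int) (lt s : List Char) :
    pvStepB perm lt s = perm.map (fun j => pvLtApp lt (PySem.List.pyGetD s j ' ')) := rfl

theorem pv_ltApp_getD (lt : List Char) (c : Char) (h97 : 97 ≤ c.toNat)
    (hlt : c.toNat - 97 < lt.length) :
    pvLtApp lt c = lt.getD (c.toNat - 97) ' ' := by
  unfold pvLtApp
  rw [PySem.List.pyGetD_eq_getElem lt ' ' (by omega) (by push_cast; omega)]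
  have hx : ((c.toNat : Int) - 97).toNat = c.toNat - 97 := by omega
  simp only [hx]
  rw [List.getD_eq_getElem?_getD, List.getElem?_eq_getElem hlt]
  rfl

theorem pv_ltApp_base (base : List Char) (hB : pvBaseOK base) (c : Char) (hc : c ∈ base) :
    pvLtApp base c = c := by
  obtain ⟨h1, h2⟩ := (pv_mem_base_iff base hB c).mp hc
  rw [pv_ltApp_getD base c h1 (by omega)]
  exact pv_char_eq_of_toNat (by rw [hB.2 _ (by omega)]; omega)

theorem pv_map_ltApp_base (base lt : List Char) (hB : pvBaseOK base)
    (hl : lt.length = base.length) : base.map (pvLtApp lt) = lt := by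
  apply List.ext_getElem (by simp [hl])
  intro k hk hk'
  have hkb : k < base.length := by simpa using hk
  have hcode := hB.2 k hkb
  rw [List.getD_eq_getElem?_getD, List.getElem?_eq_getElem hkb] at hcode
  simp only [Option.getD_some] at hcode
  simp only [List.getElem_map]
  rw [pv_ltApp_getD _ _ (by omega) (by omega)]
  rw [List.getD_eq_getElem?_getD, List.getElem?_eq_getElem (by omega : base[k].toNat - 97 < lt.length)]
  simp only [Option.getD_some]
  congr 1
  omega

theorem pv_stepB_as_map_v (base : List Char) (lt v : List Char) (hv : v.length = base.length) :
    pvStepB (pvR base) lt v = v.map (pvLtApp lt) := by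
  rw [pv_stepB_eq]
  have : (fun j => pvLtApp lt (PySem.List.pyGetD v j ' '))
      = (pvLtApp lt) ∘ (fun j => PySem.List.pyGetD v j ' ') := rfl
  rw [this, ← List.map_map]
  congr 1
  rw [pvR, ← hv]
  exact PySem.List.map_pyGetD_pyRange_zero' v ' '

theorem pv_stepB_id (base v : List Char) (hB : pvBaseOK base) (hv : List.Perm v base) :
    pvStepB (pvR base) base v = v := by
  rw [pv_stepB_as_map_v base base v hv.length_eq]
  rw [List.map_congr_left (fun c hc => pv_ltApp_base base hB c (hv.mem_iff.mp hc))]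
  exact List.map_id v

theorem pv_stepB_perm_of (base : List Char) (perm : List Int) (lt v : List Char)
    (hB : pvBaseOK base) (hp : List.Perm perm (pvR base)) (hl : List.Perm lt base)
    (hv : List.Perm v base) : List.Perm (pvStepB perm lt v) base := by
  have h1 : List.Perm (pvStepB perm lt v) (pvStepB (pvR base) lt v) := hp.map _
  rw [pv_stepB_as_map_v base lt v hv.length_eq] at h1
  have h2 : List.Perm (v.map (pvLtApp lt)) (base.map (pvLtApp lt)) := hv.map _
  rw [pv_map_ltApp_base base lt hB hl.length_eq] at h2
  exact (h1.trans h2).trans hl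

theorem pv_getD_mem_base (base v : List Char) (hv : List.Perm v base) (j : Int)
    (h0 : 0 ≤ j) (h1 : j < (base.length : Int)) :
    PySem.List.pyGetD v j ' ' ∈ base := by
  have hlen : v.length = base.length := hv.length_eq
  rw [PySem.List.pyGetD_eq_getElem v ' ' h0 (by omega)]
  exact hv.mem_iff.mp (List.getElem_mem _)

theorem pv_stepB_inj (base : List Char) (perm : List Int) (lt u w : List Char)
    (hB : pvBaseOK base) (hp : List.Perm perm (pvR base)) (hl : List.Perm lt base)
    (hu : List.Perm u base) (hw : List.Perm w base)
    (h : pvStepB perm lt u = pvStepB perm lt w) : u = w := by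
  have hltnd : lt.Nodup := (hl.nodup_iff).mpr hB.1
  have hlen : lt.length = base.length := hl.length_eq
  have key : ∀ j ∈ perm, PySem.List.pyGetD u j ' ' = PySem.List.pyGetD w j ' ' := by
    intro j hj
    have hjr : (0:Int) ≤ j ∧ j < (base.length : Int) := by
      have := hp.mem_iff.mp hj
      rw [pvR] at this
      exact PySem.List.mem_pyRange_one.mp this
    have hcu := pv_getD_mem_base base u hu j hjr.1 hjr.2
    have hcw := pv_getD_mem_base base w hw j hjr.1 hjr.2
    obtain ⟨hu1, hu2⟩ := (pv_mem_base_iff base hB _).mp hcu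
    obtain ⟨hw1, hw2⟩ := (pv_mem_base_iff base hB _).mp hcw
    have e1 : pvLtApp lt (PySem.List.pyGetD u j ' ') = lt[(PySem.List.pyGetD u j ' ').toNat - 97]'(by omega) := by
      rw [pvLtApp, PySem.List.pyGetD_eq_getElem lt ' ' (by omega) (by push_cast; omega)]
      congr 1; omega
    have e2 : pvLtApp lt (PySem.List.pyGetD w j ' ') = lt[(PySem.List.pyGetD w j ' ').toNat - 97]'(by omega) := by
      rw [pvLtApp, PySem.List.pyGetD_eq_getElem lt ' ' (by omega) (by push_cast; omega)]
      congr 1; omega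
    rw [pv_stepB_eq, pv_stepB_eq] at h
    have he := (List.map_eq_map_iff.mp h) j hj
    rw [e1, e2] at he
    have := (hltnd.getElem_inj_iff).mp he
    exact pv_char_eq_of_toNat (by omega)
  apply List.ext_getElem (by rw [hu.length_eq, hw.length_eq])
  intro k hk hk'
  have hkb : k < base.length := by rw [← hu.length_eq]; exact hk
  have hjmem : ((k : Int)) ∈ perm := by
    apply hp.mem_iff.mpr
    rw [pvR]
    exact PySem.List.mem_pyRange_one.mpr ⟨by omega, by push_cast; omega⟩
  have := key _ hjmem
  rw [PySem.List.pyGetD_eq_getElem u ' ' (by omega) (by push_cast; omega),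
      PySem.List.pyGetD_eq_getElem w ' ' (by omega) (by push_cast; omega)] at this
  simpa using this

theorem pv_perm_length (base : List Char) (perm : List Int)
    (hp : List.Perm perm (pvR base)) : perm.length = base.length := by
  rw [hp.length_eq, pvR, PySem.List.length_pyRange_one]; omega

theorem pv_ltApp_map (lt : List Char) (f : Char → Char) (c : Char)
    (h97 : 97 ≤ c.toNat) (hlt : c.toNat - 97 < lt.length) :
    pvLtApp (lt.map f) c = f (pvLtApp lt c) := by
  unfold pvLtApp
  rw [PySem.List.pyGetD_eq_getElem (lt.map f) ' ' (by omega) (by simp; omega),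
      PySem.List.pyGetD_eq_getElem lt ' ' (by omega) (by push_cast; omega)]
  simp

theorem pv_p_step (base : List Char) (perm : List Int) (lt v : List Char) (c1 c2 : Char)
    (hB : pvBaseOK base) (hp : List.Perm perm (pvR base)) (hl : List.Perm lt base)
    (hv : List.Perm v base) :
    (pvStepB perm lt v).map (pvRho c1 c2) = pvStepB perm (lt.map (pvRho c1 c2)) v := by
  rw [pv_stepB_eq, pv_stepB_eq, List.map_map]
  apply List.map_congr_left
  intro j hj
  have hjr : (0:Int) ≤ j ∧ j < (base.length : Int) :=
    PySem.List.mem_pyRange_one.mp (by rw [← pvR]; exact hp.mem_iff.mp hj)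
  have hcm : PySem.List.pyGetD v j ' ' ∈ base := pv_getD_mem_base base v hv j hjr.1 hjr.2
  obtain ⟨h97, hub⟩ := (pv_mem_base_iff base hB _).mp hcm
  have hllen : lt.length = base.length := hl.length_eq
  exact (pv_ltApp_map lt (pvRho c1 c2) _ h97 (by omega)).symm

theorem pv_head_d (d : String) (c : Char) (arg : List Char) (h : d.toList = c :: arg) :
    PySem.Str.pyGet? d 0 = some c := by
  simp [PySem.Str.pyGet?, h]

theorem pv_arg_d (d : String) (c : Char) (arg : List Char) (h : d.toList = c :: arg) :
    (PySem.Str.slice d (some 1) none).toList = arg := by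
  simp [PySem.Str.slice, h]
  rw [PySem.List.slice_from_one]
  rfl

-- d.startswith(<single letter>) just inspects the first character of a nonempty d
theorem pv_sw_c (c x : Char) (arg : List Char) :
    PySem.Chars.startswith (c :: arg) [x] = (c == x) := by
  cases hcx : (c == x) with
  | true =>
    have : c = x := by simpa using hcx
    subst this
    exact (PySem.Chars.startswith_iff _ _).mpr (by simp)
  | false =>
    have hne : ¬ c = x := by simpa using hcx
    by_contra hcon
    rw [Bool.not_eq_false] at hcon
    have := (PySem.Chars.startswith_iff _ _).mp hcon
    rw [List.cons_prefix_cons] at this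
    exact hne this.1.symm

-- ---- one dance move: A on the state equals B's parse+apply on the tables ----

theorem pv_move_eq (base : List Char) (hB : pvBaseOK base)
    (perm : List Int) (lt v : List Char)
    (hp : List.Perm perm (pvR base)) (hl : List.Perm lt base) (hv : List.Perm v base)
    (d : String) (hd : pvValidMove base.length d = true) :
    ∃ perm' lt', (pvParseMove d).bind (pvApplyMove (perm, lt)) = some (perm', lt') ∧
      List.Perm perm' (pvR base) ∧ List.Perm lt' base ∧
      pvMoveA (base.length : Int) (pvStepB perm lt v) d = some (pvStepB perm' lt' v) := by
  have hplen : perm.length = base.length := pv_perm_length base perm hp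
  have hvlen : v.length = base.length := hv.length_eq
  have hllen : lt.length = base.length := hl.length_eq
  cases hD : d.toList with
  | nil => rw [pvValidMove, hD] at hd; simp at hd
  | cons c arg =>
  simp only [pvValidMove, hD] at hd
  unfold pvMoveA pvParseMove
  simp only [pv_head_d d c arg hD, pv_arg_d d c arg hD, PySem.Str.startswith_eq, hD,
    (show ("s" : String).toList = ['s'] from rfl), (show ("x" : String).toList = ['x'] from rfl),
    (show ("p" : String).toList = ['p'] from rfl), pv_sw_c]
  by_cases hs : c = 's'
  · subst hs
    rw [if_pos rfl] at hd
    rw [if_pos rfl, if_pos (by decide)]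
    obtain ⟨n, hn⟩ := Option.isSome_iff_exists.mp hd
    simp only [hn, Option.map_some, Option.bind_some]
    set perm' := PySem.List.slice perm (some (-n)) none ++ PySem.List.slice perm none (some (-n)) with hperm'
    have hpp : List.Perm perm' perm := pv_spin_perm perm (-n)
    have hpR : List.Perm perm' (pvR base) := hpp.trans hp
    have hmap : PySem.List.slice (pvStepB perm lt v) (some (-n)) none
          ++ PySem.List.slice (pvStepB perm lt v) none (some (-n))
        = pvStepB perm' lt v := by
      rw [pv_stepB_eq, pv_slice_map, pv_slice_map, ← List.map_append, pv_stepB_eq]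
    rw [hmap]
    have hsp : List.Perm (pvStepB perm' lt v) base := pv_stepB_perm_of base perm' lt v hB hpR hl hv
    have hnd : (pvStepB perm' lt v).Nodup := hsp.nodup_iff.mpr hB.1
    have hlen : (pvStepB perm' lt v).length = base.length := hsp.length_eq
    rw [if_pos ?_]
    · exact ⟨perm', lt, rfl, hpR, hl, rfl⟩
    · constructor
      · rw [PySem.Set.ofList_eq_self_of_nodup _ hnd]
        simp [PySem.Set.len, PySem.List.len]
      · simp [PySem.List.len, hlen]
  · by_cases hx : c = 'x'
    · subst hx
      rw [if_neg hs] at hd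
      rw [if_pos rfl] at hd
      rw [if_neg hs, if_pos rfl, if_neg (by decide), if_pos (by decide)]
      rcases hPe : pvPart arg with ⟨a1, found, a2⟩
      simp only [hPe] at hd ⊢
      cases found with
      | false => simp at hd
      | true =>
      cases h1 : PySem.Int.ofChars? a1 with
      | none => simp only [h1] at hd; exact absurd hd (by decide)
      | some i1 =>
      cases h2 : PySem.Int.ofChars? a2 with
      | none => simp only [h1, h2] at hd; exact absurd hd (by decide)
      | some i2 =>
      simp only [h1, h2] at hd ⊢
      rw [decide_eq_true_iff] at hd
      obtain ⟨hb1, hb2, hb3, hb4⟩ := hd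
      have hm0 : 0 < base.length := by omega
      set k1 := pvNorm base.length i1 with hk1def
      set k2 := pvNorm base.length i2 with hk2def
      have hk1 : k1 < base.length := pv_norm_lt _ _ hb1 hb2
      have hk2 : k2 < base.length := pv_norm_lt _ _ hb3 hb4
      have g2 := pv_idx_get base.length i2 hb3 hb4 perm (0 : Int) hplen
      have g1 := pv_idx_get base.length i1 hb1 hb2 perm (0 : Int) hplen
      set t1 := PySem.List.pyGetD perm ((k2 : Nat) : Int) 0 with ht1
      set t2 := PySem.List.pyGetD perm ((k1 : Nat) : Int) 0 with ht2
      have s1 := pv_idx_set base.length i1 hb1 hb2 perm t1 hplen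
      rw [← hk1def] at s1
      have s2' := pv_idx_set base.length i2 hb3 hb4 (perm.set k1 t1) t2 (by simp [hplen])
      rw [← hk2def] at s2'
      set q2 := (perm.set k1 t1).set k2 t2 with hq2
      have hq2p : List.Perm q2 perm := by
        have e1 : t1 = perm[k2]'(by omega) := by
          rw [ht1, PySem.List.pyGetD_eq_getElem perm 0 (by omega) (by push_cast; omega)]
          simp
        have e2 : t2 = perm[k1]'(by omega) := by
          rw [ht2, PySem.List.pyGetD_eq_getElem perm 0 (by omega) (by push_cast; omega)]
          simp
        rw [hq2, e1, e2]
        exact List.set_set_perm (by omega) (by omega)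
      -- B's side: the guard holds and the single enumerate pass builds exactly q2
      have hswap : pvSwapAt perm i1 i2 = some q2 := by
        unfold pvSwapAt
        rw [if_pos (by refine ⟨by omega, by omega, by omega, by omega⟩)]
        rw [show PySem.Int.mod i1 (perm.length : Int) = ((k1 : Nat) : Int) by
              rw [hplen]; exact pv_norm_eq_mod base.length i1 hb1 hb2 hm0,
            show PySem.Int.mod i2 (perm.length : Int) = ((k2 : Nat) : Int) by
              rw [hplen]; exact pv_norm_eq_mod base.length i2 hb3 hb4 hm0]
        rw [pv_enumSwap perm k1 k2 (by omega) (by omega)]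
      refine ⟨q2, lt, ?_, hq2p.trans hp, hl, ?_⟩
      · simp only [Option.bind_some, pvApplyMove, hswap, Option.map_some]
      · rw [pv_stepB_eq]
        simp only [pv_pyGet?_map, pv_pySet?_map, g2, g1, Option.map_some, s1, s2']
        rw [pv_stepB_eq]
    · by_cases hpc : c = 'p'
      · subst hpc
        rw [if_neg hs, if_neg hx, if_pos rfl] at hd
        rw [if_neg hs, if_neg hx, if_pos rfl,
            if_neg (by decide), if_neg (by decide), if_pos (by decide)]
        rcases hPe : pvPart arg with ⟨a1, found, a2⟩
        simp only [hPe] at hd ⊢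
        cases found with
        | false => simp at hd
        | true =>
        match a1, hd with
        | [], hd => simp at hd
        | c1 :: cc :: tt, hd => simp at hd
        | [c1], hd =>
        match a2, hd with
        | [], hd => simp at hd
        | c2 :: cc :: tt, hd => simp at hd
        | [c2], hd =>
        rw [decide_eq_true_iff] at hd
        obtain ⟨hb1, hb2, hb3, hb4⟩ := hd
        have hc1 : c1 ∈ base := (pv_mem_base_iff base hB c1).mpr ⟨hb1, hb2⟩
        have hc2 : c2 ∈ base := (pv_mem_base_iff base hB c2).mpr ⟨hb3, hb4⟩
        have hsp : List.Perm (pvStepB perm lt v) base := pv_stepB_perm_of base perm lt v hB hp hl hv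
        set s := pvStepB perm lt v with hsdef
        have hsnd : s.Nodup := hsp.nodup_iff.mpr hB.1
        have hc1s : c1 ∈ s := hsp.mem_iff.mpr hc1
        have hc2s : c2 ∈ s := hsp.mem_iff.mpr hc2
        have hi1s : List.idxOf c1 s < s.length := List.idxOf_lt_length_of_mem hc1s
        have hi2s : List.idxOf c2 s < s.length := List.idxOf_lt_length_of_mem hc2s
        simp only [pv_index?_of_mem s c1 hc1s, pv_index?_of_mem s c2 hc2s]
        have gA2 : PySem.List.pyGet? s ((List.idxOf c2 s : Nat) : Int) = some c2 := by
          rw [PySem.List.pyGet?_natCast, List.getElem?_eq_getElem hi2s, List.getElem_idxOf]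
        have gA1 : PySem.List.pyGet? s ((List.idxOf c1 s : Nat) : Int) = some c1 := by
          rw [PySem.List.pyGet?_natCast, List.getElem?_eq_getElem hi1s, List.getElem_idxOf]
        have sA1 : PySem.List.pySet? s ((List.idxOf c1 s : Nat) : Int) c2
            = some (s.set (List.idxOf c1 s) c2) := PySem.List.pySet?_natCast s _ c2 hi1s
        have sA2 : PySem.List.pySet? (s.set (List.idxOf c1 s) c2) ((List.idxOf c2 s : Nat) : Int) c1
            = some ((s.set (List.idxOf c1 s) c2).set (List.idxOf c2 s) c1) :=
          PySem.List.pySet?_natCast _ _ c1 (by simpa using hi2s)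
        have hswA : (s.set (List.idxOf c1 s) c2).set (List.idxOf c2 s) c1 = s.map (pvRho c1 c2) :=
          pv_swap_eq_map_rho s c1 c2 hsnd hc1s hc2s
        have hltp : List.Perm (lt.map (pvRho c1 c2)) base := by
          have hltnd : lt.Nodup := hl.nodup_iff.mpr hB.1
          have hc1l : c1 ∈ lt := hl.mem_iff.mpr hc1
          have hc2l : c2 ∈ lt := hl.mem_iff.mpr hc2
          have hj1l : List.idxOf c1 lt < lt.length := List.idxOf_lt_length_of_mem hc1l
          have hj2l : List.idxOf c2 lt < lt.length := List.idxOf_lt_length_of_mem hc2l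
          have hswB : (lt.set (List.idxOf c1 lt) c2).set (List.idxOf c2 lt) c1 = lt.map (pvRho c1 c2) :=
            pv_swap_eq_map_rho lt c1 c2 hltnd hc1l hc2l
          have hltlt : List.Perm ((lt.set (List.idxOf c1 lt) c2).set (List.idxOf c2 lt) c1) lt := by
            have h := List.set_set_perm hj1l hj2l
            rw [List.getElem_idxOf hj2l, List.getElem_idxOf hj1l] at h
            exact h
          exact (hswB ▸ hltlt).trans hl
        refine ⟨perm, lt.map (pvRho c1 c2), ?_, hp, hltp, ?_⟩
        · simp only [Option.bind_some, pvApplyMove]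
          have he : (fun c => if c = c1 then c2 else if c = c2 then c1 else c) = pvRho c1 c2 := rfl
          rw [he]
        · simp only [gA2, gA1, sA1, sA2, hswA]
          rw [pv_p_step base perm lt v c1 c2 hB hp hl hv]
      · rw [if_neg hs, if_neg hx, if_neg hpc] at hd
        exact absurd hd (by decide)


-- ---- the whole dance: B's compile fold succeeds and A's perform_dance is B's table step ----

theorem pv_fold_eq (base : List Char) (hB : pvBaseOK base) :
    ∀ (moves : List String) (perm : List Int) (lt : List Char),
      moves.all (pvValidMove base.length) = true →
      List.Perm perm (pvR base) → List.Perm lt base →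
      ∃ P L, moves.foldl (fun acc d => acc.bind (fun st => (pvParseMove d).bind (pvApplyMove st)))
          (some (perm, lt))
          = some (P, L) ∧ List.Perm P (pvR base) ∧ List.Perm L base ∧
        ∀ v, List.Perm v base →
          moves.foldl (fun acc d => acc.bind (fun p => pvMoveA (base.length : Int) p d))
              (some (pvStepB perm lt v))
            = some (pvStepB P L v) := by
  intro moves
  induction moves with
  | nil =>
    intro perm lt _ hp hl
    exact ⟨perm, lt, rfl, hp, hl, fun v _ => rfl⟩
  | cons d rest ih =>
    intro perm lt hval hp hl
    rw [List.all_cons, Bool.and_eq_true] at hval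
    obtain ⟨perm', lt', hB1, hp', hl', _⟩ :=
      pv_move_eq base hB perm lt base hp hl (List.Perm.refl base) d hval.1
    obtain ⟨P, L, hfold, hPp, hLp, hArest⟩ := ih perm' lt' hval.2 hp' hl'
    refine ⟨P, L, ?_, hPp, hLp, ?_⟩
    · rw [List.foldl_cons, Option.bind_some, hB1]
      exact hfold
    · intro v hv
      obtain ⟨perm'', lt'', hB2, _, _, hA2⟩ := pv_move_eq base hB perm lt v hp hl hv d hval.1
      rw [hB1] at hB2
      obtain ⟨e1, e2⟩ : perm' = perm'' ∧ lt' = lt'' := by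
        have := Option.some_inj.mp hB2
        exact ⟨congrArg Prod.fst this, congrArg Prod.snd this⟩
      rw [List.foldl_cons, Option.bind_some, hA2, ← e1, ← e2]
      exact hArest v hv

theorem pv_danceA_eq (base : List Char) (hB : pvBaseOK base) (dance : List String)
    (P : List Int) (L : List Char)
    (hp : List.Perm P (pvR base)) (hl : List.Perm L base)
    (hA : ∀ v, List.Perm v base →
      dance.foldl (fun acc d => acc.bind (fun p => pvMoveA (base.length : Int) p d)) (some v)
        = some (pvStepB P L v)) :
    ∀ v, List.Perm v base → pvDanceA dance v = some (pvStepB P L v) := by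
  intro v hv
  unfold pvDanceA
  have hlen : PySem.List.len v = (base.length : Int) := by simp [PySem.List.len, hv.length_eq]
  simp only [hlen, hA v hv]
  have hres : List.Perm (pvStepB P L v) base := pv_stepB_perm_of base P L v hB hp hl hv
  rw [if_pos ?_]
  · constructor
    · rw [PySem.Set.ofList_eq_self_of_nodup _ (hres.nodup_iff.mpr hB.1)]
      simp [PySem.Set.len, PySem.List.len]
    · simp [PySem.List.len, hres.length_eq]

-- ---- iterated dances ----

theorem pv_iterB_succ_right (P : List Int) (L : List Char) (k : Nat) (s : List Char) :
    pvIterB P L (k + 1) s = pvStepB P L (pvIterB P L k s) := by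
  induction k generalizing s with
  | zero => rfl
  | succ k ih => rw [pvIterB, ih (pvStepB P L s)]; rfl

def pvSt (P : List Int) (L base : List Char) (k : Nat) : List Char := pvIterB P L k base

theorem pv_st_perm (base : List Char) (P : List Int) (L : List Char) (hB : pvBaseOK base)
    (hp : List.Perm P (pvR base)) (hl : List.Perm L base) (k : Nat) :
    List.Perm (pvSt P L base k) base := by
  induction k with
  | zero => exact List.Perm.refl base
  | succ k ih =>
    rw [pvSt, pv_iterB_succ_right]
    exact pv_stepB_perm_of base P L _ hB hp hl ih

theorem pv_restA_eq (base : List Char) (hB : pvBaseOK base) (dance : List String)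
    (P : List Int) (L : List Char)
    (hp : List.Perm P (pvR base)) (hl : List.Perm L base)
    (hA : ∀ v, List.Perm v base → pvDanceA dance v = some (pvStepB P L v)) :
    ∀ (r : Nat) (s : List Char), List.Perm s base →
      pvRestA dance r s = some (pvIterB P L r s) := by
  intro r
  induction r with
  | zero => intro s _; rfl
  | succ r ih =>
    intro s hs
    rw [pvRestA, hA s hs, Option.bind_some, pvIterB,
      ih (pvStepB P L s) (pv_stepB_perm_of base P L s hB hp hl hs)]

-- what B does with the (p, s) pair the while loop hands back
def pvPost (P : List Int) (L base : List Char) (nb_iter : Int) (pr : Int × List Char) : List Char :=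
  if pr.2 ≠ base then pr.2
  else pvIterB P L (PySem.Int.mod (nb_iter - pr.1) pr.1).toNat pr.2

-- ---- the main loop: A's dict-driven loop computes what B's while loop computes ----

theorem pv_loop_eq (base : List Char) (hB : pvBaseOK base) (dance : List String)
    (P : List Int) (L : List Char) (nb_iter : Int)
    (hp : List.Perm P (pvR base)) (hl : List.Perm L base)
    (hA : ∀ v, List.Perm v base → pvDanceA dance v = some (pvStepB P L v)) :
    ∀ (f : Nat) (k : Nat) (seen : PySem.Dict (List Char) Int),
      (f : Int) = nb_iter - 2 - (k : Int) →
      (∀ x, seen.contains x = true ↔ ∃ j, j ≤ k ∧ x = pvSt P L base j) →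
      seen.get? base = some 0 →
      (∀ j1 j2, j1 < j2 → j2 ≤ k → pvSt P L base j1 ≠ pvSt P L base j2) →
      pvLoopA dance nb_iter (f + 1) ((k : Int) + 1) (pvSt P L base k) seen
        = some (pvPost P L base nb_iter
            (pvWhileB P L base nb_iter f ((k : Int) + 1) (pvSt P L base (k + 1)))) := by
  intro f
  induction f with
  | zero =>
    intro k seen hf hc hg hnr
    have hstk : List.Perm (pvSt P L base k) base := pv_st_perm base P L hB hp hl k
    have hstk1 : pvSt P L base (k + 1) = pvStepB P L (pvSt P L base k) :=
      pv_iterB_succ_right P L k base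
    rw [pvLoopA]
    simp only [hA _ hstk, ← hstk1]
    by_cases hb : pvSt P L base (k + 1) = base
    · have hcont : seen.contains (pvSt P L base (k + 1)) = true := (hc _).mpr ⟨0, by omega, hb⟩
      rw [if_pos hcont, hb]
      simp only [hg]
      have hmod : PySem.Int.mod? (nb_iter - ((k : Int) + 1)) ((k : Int) + 1 - 0)
          = some (PySem.Int.mod (nb_iter - ((k : Int) + 1)) ((k : Int) + 1)) := by
        rw [sub_zero]
        unfold PySem.Int.mod?
        rw [if_neg (by omega : ¬((k : Int) + 1 = 0))]
        rfl
      simp only [hmod]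
      rw [pv_restA_eq base hB dance P L hp hl hA _ base (List.Perm.refl base)]
      rw [pvWhileB]
      simp only [pvPost]
      rw [if_neg (by simp)]
    · have hncont : seen.contains (pvSt P L base (k + 1)) = false := by
        by_contra hcon
        rw [Bool.not_eq_false] at hcon
        obtain ⟨j, hj, he⟩ := (hc _).mp hcon
        cases j with
        | zero => exact hb he
        | succ j' =>
          have hstj : pvSt P L base (j' + 1) = pvStepB P L (pvSt P L base j') :=
            pv_iterB_succ_right P L j' base
          have hinj := pv_stepB_inj base P L _ _ hB hp hl
            (pv_st_perm base P L hB hp hl j') (pv_st_perm base P L hB hp hl k)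
            (by rw [← hstj, ← hstk1]; exact he.symm)
          exact hnr j' k (by omega) (by omega) hinj
      rw [if_neg (by simp [hncont])]
      rw [pvLoopA]
      rw [pvWhileB]
      simp only [pvPost]
      rw [if_pos (by simpa using hb)]
  | succ f ihf =>
    intro k seen hf hc hg hnr
    have hstk : List.Perm (pvSt P L base k) base := pv_st_perm base P L hB hp hl k
    have hstk1 : pvSt P L base (k + 1) = pvStepB P L (pvSt P L base k) :=
      pv_iterB_succ_right P L k base
    rw [pvLoopA]
    simp only [hA _ hstk, ← hstk1]
    by_cases hb : pvSt P L base (k + 1) = base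
    · have hcont : seen.contains (pvSt P L base (k + 1)) = true := (hc _).mpr ⟨0, by omega, hb⟩
      rw [if_pos hcont, hb]
      simp only [hg]
      have hmod : PySem.Int.mod? (nb_iter - ((k : Int) + 1)) ((k : Int) + 1 - 0)
          = some (PySem.Int.mod (nb_iter - ((k : Int) + 1)) ((k : Int) + 1)) := by
        rw [sub_zero]
        unfold PySem.Int.mod?
        rw [if_neg (by omega : ¬((k : Int) + 1 = 0))]
        rfl
      simp only [hmod]
      rw [pv_restA_eq base hB dance P L hp hl hA _ base (List.Perm.refl base)]
      rw [pvWhileB, if_neg (by simp)]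
      simp only [pvPost]
      rw [if_neg (by simp)]
    · have hncont : seen.contains (pvSt P L base (k + 1)) = false := by
        by_contra hcon
        rw [Bool.not_eq_false] at hcon
        obtain ⟨j, hj, he⟩ := (hc _).mp hcon
        cases j with
        | zero => exact hb he
        | succ j' =>
          have hstj : pvSt P L base (j' + 1) = pvStepB P L (pvSt P L base j') :=
            pv_iterB_succ_right P L j' base
          have hinj := pv_stepB_inj base P L _ _ hB hp hl
            (pv_st_perm base P L hB hp hl j') (pv_st_perm base P L hB hp hl k)
            (by rw [← hstj, ← hstk1]; exact he.symm)
          exact hnr j' k (by omega) (by omega) hinj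
      rw [if_neg (by simp [hncont])]
      set p' := pvSt P L base (k + 1) with hp'def
      -- new invariants after inserting p' at counter k+1
      have hc' : ∀ x, (seen.insert p' ((k : Int) + 1)).contains x = true ↔
          ∃ j, j ≤ k + 1 ∧ x = pvSt P L base j := by
        intro x
        rw [PySem.Dict.contains_insert]
        simp only [Bool.or_eq_true, beq_iff_eq]
        constructor
        · rintro (he | hx)
          · exact ⟨k + 1, le_refl _, he⟩
          · obtain ⟨j, hj, he⟩ := (hc x).mp hx
            exact ⟨j, by omega, he⟩
        · rintro ⟨j, hj, he⟩
          rcases Nat.lt_or_ge j (k + 1) with hlt | hge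
          · exact Or.inr ((hc x).mpr ⟨j, by omega, he⟩)
          · have : j = k + 1 := by omega
            subst this
            exact Or.inl he
      have hg' : (seen.insert p' ((k : Int) + 1)).get? base = some 0 := by
        rw [PySem.Dict.get?_insert_of_ne _ _ (fun he => hb he.symm)]
        exact hg
      have hnr' : ∀ j1 j2, j1 < j2 → j2 ≤ k + 1 →
          pvSt P L base j1 ≠ pvSt P L base j2 := by
        intro j1 j2 h12 h2k
        rcases Nat.lt_or_ge j2 (k + 1) with hlt | hge
        · exact hnr j1 j2 h12 (by omega)
        · have : j2 = k + 1 := by omega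
          subst this
          intro he
          have : seen.contains p' = true := (hc p').mpr ⟨j1, by omega, he.symm⟩
          rw [hncont] at this
          exact Bool.noConfusion this
      have hrec := ihf (k + 1) (seen.insert p' ((k : Int) + 1)) (by push_cast at hf ⊢; omega) hc' hg' hnr'
      have hcast : (((k + 1 : Nat) : Int)) + 1 = (k : Int) + 1 + 1 := by push_cast; ring
      rw [hcast] at hrec
      have hstk2 : pvSt P L base (k + 1 + 1) = pvStepB P L p' := by
        rw [hp'def]; exact pv_iterB_succ_right P L (k + 1) base
      rw [hrec, pvWhileB, if_pos ⟨hb, by push_cast at hf; omega⟩, ← hstk2]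


-- ===== VERDICT (by name: the statement is the Claim_ definition above) =====
theorem perform_many_dances_spec : Claim_equal_perform_many_dances := by
  intro dance nb_prog nb_iter _ hpre
  unfold Spec_perform_many_dances perform_many_dances perform_many_dances_alt
  have hB : pvBaseOK (PySem.List.slice pvLow none (some nb_prog)) := pv_base_ok nb_prog
  set base := PySem.List.slice pvLow none (some nb_prog) with hbase
  by_cases hni : nb_iter ≤ 1
  · rw [if_pos hni, (by omega : (nb_iter - 1).toNat = 0)]
    rfl
  · rw [if_neg hni]
    have hval : dance.all (pvValidMove base.length) = true := hpre.resolve_left hni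
    obtain ⟨P, L, hPL, hp, hl, hAfold⟩ :=
      pv_fold_eq base hB dance (pvR base) base hval (List.Perm.refl _) (List.Perm.refl _)
    have hA : ∀ v, List.Perm v base → pvDanceA dance v = some (pvStepB P L v) := by
      apply pv_danceA_eq base hB dance P L hp hl
      intro v hv
      have := hAfold v hv
      rwa [pv_stepB_id base v hB hv] at this
    have hc0 : ∀ x, (PySem.Dict.insert PySem.Dict.empty base (0 : Int)).contains x = true ↔
        ∃ j, j ≤ 0 ∧ x = pvSt P L base j := by
      intro x
      rw [PySem.Dict.contains_insert]
      simp only [Bool.or_eq_true, beq_iff_eq]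
      constructor
      · rintro (he | hx)
        · exact ⟨0, le_refl _, he⟩
        · simp [PySem.Dict.contains, PySem.Dict.empty] at hx
      · rintro ⟨j, hj, he⟩
        interval_cases j
        exact Or.inl he
    have hg0 : (PySem.Dict.insert PySem.Dict.empty base (0 : Int)).get? base = some 0 :=
      PySem.Dict.get?_insert_self _ _ _
    have hnr0 : ∀ j1 j2, j1 < j2 → j2 ≤ 0 → pvSt P L base j1 ≠ pvSt P L base j2 := by
      intro j1 j2 h1 h2; omega
    have hfuel : (nb_iter - 1).toNat = (nb_iter - 2).toNat + 1 := by omega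
    have hloop := pv_loop_eq base hB dance P L nb_iter hp hl hA
      ((nb_iter - 2).toNat) 0 (PySem.Dict.insert PySem.Dict.empty base (0 : Int))
      (by omega) hc0 hg0 hnr0
    simp only [Nat.cast_zero, zero_add] at hloop
    rw [show PySem.List.pyRange 0 (base.length : Int) 1 = pvR base from rfl]
    simp only [hPL]
    rw [show pvSt P L base 0 = base from rfl] at hloop
    rw [hfuel, hloop]
    have hst1 : pvSt P L base 1 = pvStepB P L base := rfl
    rw [hst1] at hloop ⊢
    unfold pvPost
    split_ifs with h
    · rfl
    · rfl
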